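-- pv_equiv track=rewrite | github.com/Ameen-GAMAL/RAGify | rag-system-onLectures/rag-lectures/src/ingest/chunk_text.py | pages_spanned
-- ===== SOURCE A (Python) =====
-- from typing import Dict, List, Any, Iterable, Tuple, Optional
--
-- def pages_spanned(
--     offsets: List[Tuple[int, int, int]],
--     chunk_start: int,
--     chunk_end: int
-- ) -> Tuple[Optional[int], Optional[int]]:
--     touched = [
--         page_num
--         for (page_num, s, e) in offsets
--         if not (e < chunk_start or s > chunk_end)
--     ]
--     if not touched:
--         return None, None
--     return min(touched), max(touched)
-- ===== SOURCE B (Python) =====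
-- def pages_spanned(offsets, chunk_start, chunk_end):
--     pages = sorted(p for (p, s, e) in offsets if s <= chunk_end and e >= chunk_start)
--     if pages:
--         return pages[0], pages[-1]
--     return None, None
-- ===== Notes on version B (the rewrite author's own statement) =====
-- stated objective: alternative
-- what changed: B sorts the overlapping page numbers once and reads the endpoints (first/last element of the sorted list) instead of A's two separate min() and max() reduction passes; the overlap test is the De Morgan dual of A's.
import Mathlib
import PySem

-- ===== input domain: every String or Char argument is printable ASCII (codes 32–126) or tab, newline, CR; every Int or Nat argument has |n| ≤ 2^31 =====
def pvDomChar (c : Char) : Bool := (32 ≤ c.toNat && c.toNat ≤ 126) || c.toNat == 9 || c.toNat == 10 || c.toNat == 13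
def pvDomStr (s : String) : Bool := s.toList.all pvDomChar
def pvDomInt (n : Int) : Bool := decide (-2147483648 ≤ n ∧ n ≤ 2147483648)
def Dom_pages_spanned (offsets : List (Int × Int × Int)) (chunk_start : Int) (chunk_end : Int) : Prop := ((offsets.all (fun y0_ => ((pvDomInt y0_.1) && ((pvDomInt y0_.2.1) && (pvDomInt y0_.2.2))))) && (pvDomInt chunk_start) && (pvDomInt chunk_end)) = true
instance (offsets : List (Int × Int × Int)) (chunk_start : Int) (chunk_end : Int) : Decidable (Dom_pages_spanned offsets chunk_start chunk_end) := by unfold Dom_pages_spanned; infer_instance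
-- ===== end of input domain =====

-- B sorts the overlapping page numbers once and returns the sorted list's endpoints instead of A's separate min()/max() reductions (alternative algorithm, same result).


-- ===== PORT A =====
-- touched = [page_num for (page_num, s, e) in offsets if not (e < chunk_start or s > chunk_end)]
def pagesTouched (offsets : List (Int × Int × Int)) (chunk_start : Int) (chunk_end : Int) : List Int :=
  (offsets.filter (fun t => !(decide (t.2.2 < chunk_start) || decide (t.2.1 > chunk_end)))).map (fun t => t.1)

def pages_spanned (offsets : List (Int × Int × Int)) (chunk_start : Int) (chunk_end : Int) : Option Int × Option Int :=
  let touched := pagesTouched offsets chunk_start chunk_end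
  if touched = [] then (none, none)
  else (PySem.List.min? touched (fun x => x), PySem.List.max? touched (fun x => x))

-- ===== PORT B =====
-- pages = sorted(p for (p, s, e) in offsets if s <= chunk_end and e >= chunk_start)
-- if pages: return pages[0], pages[-1]   else: return None, None
def pages_spanned_alt (offsets : List (Int × Int × Int)) (chunk_start : Int) (chunk_end : Int) : Option Int × Option Int :=
  let pages := PySem.List.sorted
    ((offsets.filter (fun t => decide (t.2.1 ≤ chunk_end) && decide (t.2.2 ≥ chunk_start))).map (fun t => t.1))
    (fun x => x) false
  if pages ≠ [] then (PySem.List.pyGet? pages 0, PySem.List.pyGet? pages (-1))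
  else (none, none)

-- ===== PRECONDITION & SPEC =====
def Spec_pages_spanned (offsets : List (Int × Int × Int)) (chunk_start : Int) (chunk_end : Int) (out : Option Int × Option Int) : Prop := out = pages_spanned_alt offsets chunk_start chunk_end
instance (offsets : List (Int × Int × Int)) (chunk_start : Int) (chunk_end : Int) (out : Option Int × Option Int) : Decidable (Spec_pages_spanned offsets chunk_start chunk_end out) := by unfold Spec_pages_spanned; infer_instance

-- ===== CLAIM (what is proved, stated in full; the proofs are below) =====
def Claim_equal_pages_spanned : Prop := ∀ (offsets : List (Int × Int × Int)) (chunk_start : Int) (chunk_end : Int), Dom_pages_spanned offsets chunk_start chunk_end → Spec_pages_spanned offsets chunk_start chunk_end (pages_spanned offsets chunk_start chunk_end)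

-- ===== LEMMAS AND PROOFS =====
-- A's and B's filter conditions are De Morgan duals, hence the filtered lists coincide.
lemma touched_eq (offsets : List (Int × Int × Int)) (chunk_start chunk_end : Int) :
    pagesTouched offsets chunk_start chunk_end
      = (offsets.filter (fun t => decide (t.2.1 ≤ chunk_end) && decide (t.2.2 ≥ chunk_start))).map (fun t => t.1) := by
  unfold pagesTouched
  congr 1
  apply List.filter_congr
  intro t _
  by_cases h1 : t.2.2 < chunk_start <;> by_cases h2 : t.2.1 > chunk_end <;>
    simp [h1, h2] <;> omega

-- in a ≤-pairwise list, the last element bounds every element from above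
lemma pairwise_le_getLast (xs : List Int) (h : xs.Pairwise (· ≤ ·)) (hne : xs ≠ []) :
    ∀ y ∈ xs, y ≤ xs.getLast hne := by
  induction xs with
  | nil => cases hne rfl
  | cons x t ih =>
      intro y hy
      cases t with
      | nil => simp at hy; simp [hy]
      | cons a s =>
          rw [List.getLast_cons (by simp)]
          rcases List.mem_cons.mp hy with rfl | hyt
          · exact le_trans ((List.pairwise_cons.mp h).1 _ (List.getLast_mem _))
              (le_refl _)
          · exact ih (List.pairwise_cons.mp h).2 (by simp) y hyt

lemma min?_eq_head_sorted (xs : List Int) (m : Int) (t : List Int)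
    (hs : PySem.List.sorted xs (fun x => x) false = m :: t) :
    PySem.List.min? xs (fun x => x) = some m := by
  have hne : xs ≠ [] := by
    intro h; subst h; rw [(PySem.List.sorted_eq_nil_iff [] (fun x => x) false).mpr rfl] at hs; cases hs
  obtain ⟨m0, hm0⟩ : ∃ m0, PySem.List.min? xs (fun x => x) = some m0 := by
    cases h : PySem.List.min? xs (fun x => x) with
    | none => exact absurd ((PySem.List.min?_eq_none_iff xs (fun x => x)).mp h) hne
    | some v => exact ⟨v, rfl⟩
  have hm0mem : m0 ∈ xs := PySem.List.min?_mem hm0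
  have hmmem : m ∈ xs := by
    rw [← PySem.List.mem_sorted xs (fun x => x) false]
    simp [hs]
  have h1 : m ≤ m0 := PySem.List.key_head_sorted_le xs (fun x => x) hs m0 hm0mem
  have h2 : m0 ≤ m := PySem.List.min?_isMin hm0 m hmmem
  rw [hm0]; congr 1; omega

lemma max?_eq_getLast_sorted (xs : List Int) (hne : PySem.List.sorted xs (fun x => x) false ≠ []) :
    PySem.List.max? xs (fun x => x)
      = some ((PySem.List.sorted xs (fun x => x) false).getLast hne) := by
  have hxs : xs ≠ [] := by
    intro h; exact hne ((PySem.List.sorted_eq_nil_iff xs (fun x => x) false).mpr h)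
  set L := (PySem.List.sorted xs (fun x => x) false).getLast hne with hL
  obtain ⟨m0, hm0⟩ : ∃ m0, PySem.List.max? xs (fun x => x) = some m0 := by
    cases h : PySem.List.max? xs (fun x => x) with
    | none => exact absurd ((PySem.List.max?_eq_none_iff xs (fun x => x)).mp h) hxs
    | some v => exact ⟨v, rfl⟩
  have hLmem : L ∈ xs := by
    rw [← PySem.List.mem_sorted xs (fun x => x) false]
    exact List.getLast_mem hne
  have hm0mem : m0 ∈ xs := PySem.List.max?_mem hm0
  have hm0sorted : m0 ∈ PySem.List.sorted xs (fun x => x) false :=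
    (PySem.List.mem_sorted xs (fun x => x) false m0).mpr hm0mem
  have h1 : m0 ≤ L :=
    pairwise_le_getLast _ (PySem.List.sorted_pairwise xs (fun x => x)) hne m0 hm0sorted
  have h2 : L ≤ m0 := PySem.List.max?_isMax hm0 L hLmem
  rw [hm0]; congr 1; omega

-- ===== VERDICT (by name: the statement is the Claim_ definition above) =====
theorem pages_spanned_spec : Claim_equal_pages_spanned := by
  intro offsets chunk_start chunk_end _
  unfold Spec_pages_spanned pages_spanned pages_spanned_alt
  rw [← touched_eq]
  set xs := pagesTouched offsets chunk_start chunk_end with hxs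
  by_cases h : xs = []
  · simp [h, PySem.List.sorted_eq_nil_iff]
  · have hsne : PySem.List.sorted xs (fun x => x) false ≠ [] := by
      simpa [PySem.List.sorted_eq_nil_iff] using h
    rw [if_neg h, if_pos hsne]
    cases hs : PySem.List.sorted xs (fun x => x) false with
    | nil => exact absurd hs hsne
    | cons m t =>
        have hmin := min?_eq_head_sorted xs m t hs
        have hmax := max?_eq_getLast_sorted xs hsne
        have hL : (PySem.List.sorted xs (fun x => x) false).getLast hsne
            = (m :: t).getLast (by simp) := List.getLast_congr _ _ hs
        rw [hmin, hmax, hL, PySem.List.pyGet?_zero_cons, PySem.List.pyGet?_neg_one,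
          List.getLast?_eq_getLast_of_ne_nil (by simp : (m :: t) ≠ [])]
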